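-- pv_equiv track=rewrite | github.com/fspv/learning | yandex/qualification-for-mentors/palindrome-concatenation-rabin-karp.py | palindromes_till_the_end
-- ===== SOURCE A (Python) =====
-- from typing import DefaultDict, List, Tuple
--
-- def manacher(array: List[str], left_offset: int) -> List[bool]:
--     left, right = 0, -1
--     cache = [0] * len(array)
--     result = [False] * (len(array) + 1)
--     result[-1] = True
--
--     for pos in range(len(array)):
--         radius = (
--             1 - left_offset
--             if pos > right
--             else min(cache[left + right - (pos - left_offset)] + 1, right - pos + 1)
--         )
--
--         while (
--             0 <= pos - left_offset - radius
--             and pos + radius < len(array)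
--             and array[pos - left_offset - radius] == array[pos + radius]
--         ):
--             radius += 1
--
--         radius -= 1
--
--         cache[pos] = radius
--
--         if pos + radius == len(array) - 1:
--             result[pos - left_offset - radius] = True
--
--         if pos + radius > right:
--             left = pos - left_offset - radius
--             right = pos + radius
--
--     return result
--
-- def palindromes_till_the_end(
--     strings: List[str],
-- ) -> Tuple[List[List[bool]], List[List[bool]]]:
--     is_palindrome_forward: List[List[bool]] = []
--     is_palindrome_back: List[List[bool]] = []
--
--     for string in strings:
--         is_palindrome_forward.append(
--             list(
--                 map(
--                     lambda x: any(x),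
--                     zip(manacher(list(string), 0), manacher(list(string), 1)),
--                 )
--             )
--         )
--         is_palindrome_back.append(
--             list(
--                 map(
--                     lambda x: any(x),
--                     zip(
--                         manacher(list(reversed(string)), 0),
--                         manacher(list(reversed(string)), 1),
--                     ),
--                 )
--             )
--         )
--
--     return is_palindrome_forward, is_palindrome_back
-- ===== SOURCE B (Python) =====
-- from typing import List, Tuple
--
-- def _suffix_palindrome_marks(s: str) -> List[bool]:
--     return [s[i:] == s[i:][::-1] for i in range(len(s) + 1)]
--
-- def palindromes_till_the_end(
--     strings: List[str],
-- ) -> Tuple[List[List[bool]], List[List[bool]]]: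
--     return (
--         [_suffix_palindrome_marks(s) for s in strings],
--         [_suffix_palindrome_marks(s[::-1]) for s in strings],
--     )
-- ===== Notes on version B (the rewrite author's own statement) =====
-- stated objective: simpler
-- what changed: B replaces A's Manacher center-expansion with mirrored-window caching (plus merging of the odd/even-center runs) by a direct per-suffix check s[i:] == s[i:][::-1], a three-line comprehension.
import Mathlib
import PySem

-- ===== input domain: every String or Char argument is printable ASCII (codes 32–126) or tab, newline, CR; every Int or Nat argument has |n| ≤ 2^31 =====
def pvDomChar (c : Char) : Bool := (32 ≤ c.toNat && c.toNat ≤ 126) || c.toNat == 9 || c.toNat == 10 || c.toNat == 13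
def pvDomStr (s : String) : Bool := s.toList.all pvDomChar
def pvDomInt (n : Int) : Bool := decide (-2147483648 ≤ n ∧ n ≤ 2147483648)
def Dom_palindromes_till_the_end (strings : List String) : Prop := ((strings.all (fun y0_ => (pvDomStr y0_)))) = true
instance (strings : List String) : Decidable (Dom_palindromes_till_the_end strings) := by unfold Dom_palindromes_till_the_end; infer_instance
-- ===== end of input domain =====

-- B replaces A's Manacher center-expansion marking with a direct per-suffix palindrome
-- check (s[i:] == s[i:][::-1]); objective: simpler (A's linear-time machinery is dropped).


-- ===== PORT A =====
-- the `while` loop of `manacher`: keeps incrementing `radius` while the guard holds;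
-- array[..] is read via pyGet? (the guard has already checked both indices are in range,
-- exactly as Python's short-circuit `and` does).
def pvExpand (a : List Char) (off : Int) (pos : Int) (r : Int) : Int :=
  if h : 0 ≤ pos - off - r ∧ pos + r < (a.length : Int) ∧
         PySem.List.pyGet? a (pos - off - r) = PySem.List.pyGet? a (pos + r) then
    pvExpand a off pos (r + 1)
  else r
termination_by ((a.length : Int) - pos - r).toNat
decreasing_by omega

-- one iteration of `for pos in range(len(array))`; state = (left, right, cache, result).
-- `cache[left + right - (pos - left_offset)]` is read via pyGet? (in every reachable state
-- the index is in range, so the `.getD 0` default is never the returned value).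
-- `result[pos - left_offset - radius] = True`: the index is nonnegative whenever this
-- branch runs, so `.toNat` is exact there.
def pvManacherStep (a : List Char) (off : Int) (st : Int × Int × List Int × List Bool)
    (pos : Nat) : Int × Int × List Int × List Bool :=
  match st with
  | (left, right, cache, result) =>
    let radius0 : Int :=
      if (pos : Int) > right then 1 - off
      else min ((PySem.List.pyGet? cache (left + right - ((pos : Int) - off))).getD 0 + 1)
               (right - (pos : Int) + 1)
    let radius := pvExpand a off (pos : Int) radius0 - 1
    let cache' := cache.set pos radius
    let result' := if (pos : Int) + radius = (a.length : Int) - 1 then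
        result.set ((pos : Int) - off - radius).toNat true
      else result
    if (pos : Int) + radius > right then
      ((pos : Int) - off - radius, (pos : Int) + radius, cache', result')
    else (left, right, cache', result')

-- `manacher(array, left_offset)`; `result = [False]*(len+1); result[-1] = True` is the
-- literal list `replicate n false ++ [true]`.
def pvManacher (a : List Char) (off : Int) : List Bool :=
  ((List.range a.length).foldl (pvManacherStep a off)
      (0, -1, List.replicate a.length 0, List.replicate a.length false ++ [true])).2.2.2

-- `list(map(lambda x: any(x), zip(u, v)))` for two lists of bools
def pvAnyZip (u v : List Bool) : List Bool := List.zipWith (fun x y => x || y) u v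

-- the main loop appending to the two accumulator lists
def palindromes_till_the_end (strings : List String) : List (List Bool) × List (List Bool) :=
  strings.foldl
    (fun acc s =>
      (acc.1 ++ [pvAnyZip (pvManacher s.toList 0) (pvManacher s.toList 1)],
       acc.2 ++ [pvAnyZip (pvManacher s.toList.reverse 0) (pvManacher s.toList.reverse 1)]))
    ([], [])

-- ===== PORT B =====
-- [s[i:] == s[i:][::-1] for i in range(len(s) + 1)]  (strings handled as their char lists;
-- s[i:] with 0 ≤ i is `drop i`, s[i:][::-1] is `.reverse`)
def pvMarks (l : List Char) : List Bool :=
  (List.range (l.length + 1)).map (fun i => decide (l.drop i = (l.drop i).reverse))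

def palindromes_till_the_end_alt (strings : List String) : List (List Bool) × List (List Bool) :=
  (strings.map (fun s => pvMarks s.toList),
   strings.map (fun s => pvMarks s.toList.reverse))

-- ===== PRECONDITION & SPEC =====
def Spec_palindromes_till_the_end (strings : List String) (out : List (List Bool) × List (List Bool)) : Prop := out = palindromes_till_the_end_alt strings
instance (strings : List String) (out : List (List Bool) × List (List Bool)) : Decidable (Spec_palindromes_till_the_end strings out) := by unfold Spec_palindromes_till_the_end; infer_instance

-- ===== CLAIM (what is proved, stated in full; the proofs are below) =====
def Claim_equal_palindromes_till_the_end : Prop := ∀ (strings : List String), Dom_palindromes_till_the_end strings → Spec_palindromes_till_the_end strings (palindromes_till_the_end strings)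

-- ===== LEMMAS AND PROOFS =====

def pvGood (a : List Char) (off p r : Int) : Prop :=
  -off ≤ r ∧ 0 ≤ p - off - r ∧ p + r < (a.length : Int) ∧
  ∀ k : Int, 1 - off ≤ k → k ≤ r → PySem.List.pyGet? a (p - off - k) = PySem.List.pyGet? a (p + k)

def pvMaxrad (a : List Char) (off p : Int) : Int := pvExpand a off p (1 - off) - 1

lemma pvGood_mono {a : List Char} {off p r r' : Int} (h : pvGood a off p r)
    (h1 : -off ≤ r') (h2 : r' ≤ r) : pvGood a off p r' := by
  unfold pvGood at h ⊢
  obtain ⟨_, hb, hc, hm⟩ := h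
  exact ⟨h1, by omega, by omega, fun k hk1 hk2 => hm k hk1 (by omega)⟩

lemma pvGood_base {a : List Char} {off p : Int} (h0 : 0 ≤ p) (h1 : p < (a.length : Int))
    (hof : 0 ≤ off) : pvGood a off p (-off) := by
  unfold pvGood
  exact ⟨le_refl _, by omega, by omega, fun k hk1 hk2 => absurd (hk1.trans hk2) (by omega)⟩

lemma pvExpand_good {a : List Char} {off p : Int} (r : Int)
    (hg : pvGood a off p (r - 1)) :
    pvGood a off p (pvExpand a off p r - 1) ∧ ¬ pvGood a off p (pvExpand a off p r) := by
  fun_induction pvExpand a off p r with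
  | case1 r h ih =>
      apply ih
      rw [show r + 1 - 1 = r from by omega]
      obtain ⟨h1, h2, h3, hm⟩ := hg
      refine ⟨by omega, by omega, h.2.1, fun k hk1 hk2 => ?_⟩
      rcases eq_or_lt_of_le hk2 with he | hl
      · subst he; exact h.2.2
      · exact hm k hk1 (by omega)
  | case2 r h =>
      refine ⟨hg, fun hgr => h ?_⟩
      obtain ⟨h1, h2, h3, hm⟩ := hgr
      exact ⟨h2, h3, hm r (by have := hg.1; omega) le_rfl⟩

lemma pvGood_unique {a : List Char} {off p r1 r2 : Int}
    (h1 : pvGood a off p r1) (h1' : ¬ pvGood a off p (r1 + 1))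
    (h2 : pvGood a off p r2) (h2' : ¬ pvGood a off p (r2 + 1)) : r1 = r2 := by
  have e1 : -off ≤ r1 := h1.1
  have e2 : -off ≤ r2 := h2.1
  rcases lt_trichotomy r1 r2 with h | h | h
  · exact absurd (pvGood_mono h2 (by omega) (by omega)) h1'
  · exact h
  · exact absurd (pvGood_mono h1 (by omega) (by omega)) h2'

lemma pvMaxrad_spec {a : List Char} {off p : Int} (h0 : 0 ≤ p) (h1 : p < (a.length : Int))
    (hof : 0 ≤ off) :
    pvGood a off p (pvMaxrad a off p) ∧ ¬ pvGood a off p (pvMaxrad a off p + 1) := by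
  have := pvExpand_good (a := a) (off := off) (p := p) (1 - off)
    (by simpa using pvGood_base h0 h1 hof)
  unfold pvMaxrad
  exact ⟨this.1, by have := this.2; simpa using this⟩

lemma pvExpand_eq_maxrad {a : List Char} {off p r : Int} (h0 : 0 ≤ p)
    (h1 : p < (a.length : Int)) (hof : 0 ≤ off) (hg : pvGood a off p (r - 1)) :
    pvExpand a off p r - 1 = pvMaxrad a off p := by
  have h := pvExpand_good r hg
  have h' := pvMaxrad_spec (a := a) h0 h1 hof
  exact pvGood_unique (by simpa using h.1) (by simpa using h.2) h'.1 h'.2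

lemma pvMaxrad_eq_of_good {a : List Char} {off p r : Int} (h0 : 0 ≤ p)
    (h1 : p < (a.length : Int)) (hof : 0 ≤ off)
    (hg : pvGood a off p r) (hng : ¬ pvGood a off p (r + 1)) : pvMaxrad a off p = r := by
  have h' := pvMaxrad_spec (a := a) h0 h1 hof
  exact pvGood_unique h'.1 h'.2 hg hng

lemma pvGood_reflect {a : List Char} {off c R : Int} (hg : pvGood a off c R)
    (hoff : off = 0 ∨ off = 1) {j : Int} (hj1 : c - off - R ≤ j) (hj2 : j ≤ c + R) :
    PySem.List.pyGet? a (2*c - off - j) = PySem.List.pyGet? a j := by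
  obtain ⟨h1, h2, h3, hm⟩ := hg
  rcases le_or_gt (c + 1 - off) j with hcase | hcase
  · have := hm (j - c) (by omega) (by omega)
    rw [show c - off - (j - c) = 2*c - off - j from by ring,
        show c + (j - c) = j from by ring] at this
    exact this
  · rcases hoff with h0 | h0
    · subst h0
      rcases eq_or_lt_of_le (show j ≤ c from by omega) with he | hl
      · rw [he, show 2*c - 0 - c = c from by ring]
      · have := hm (c - j) (by omega) (by omega)
        rw [show c - 0 - (c - j) = j from by ring] at this
        rw [this, show c + (c - j) = 2*c - 0 - j from by ring]
    · subst h0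
      have := hm (c - 1 - j) (by omega) (by omega)
      rw [show c - 1 - (c - 1 - j) = j from by ring] at this
      rw [this, show c + (c - 1 - j) = 2*c - 1 - j from by ring]

lemma pvMirror_good {a : List Char} {off : Int} {c p : Int}
    (hoff : off = 0 ∨ off = 1) (hc0 : 0 ≤ c) (hcn : c < (a.length : Int))
    (hcp : c < p) (hpr : p ≤ c + pvMaxrad a off c) :
    pvGood a off p (min (pvMaxrad a off (2*c - p)) (c + pvMaxrad a off c - p)) := by
  have hoff' : 0 ≤ off := by rcases hoff with h | h <;> omega
  have hc := (pvMaxrad_spec (a := a) (off := off) (p := c) hc0 hcn hoff').1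
  set R := pvMaxrad a off c with hR
  obtain ⟨hR1, hR2, hR3, hmc⟩ := hc
  have hm0 : 0 ≤ 2*c - p := by omega
  have hmn : 2*c - p < (a.length : Int) := by omega
  have hm := (pvMaxrad_spec (a := a) (off := off) (p := 2*c - p) hm0 hmn hoff').1
  set M := pvMaxrad a off (2*c - p) with hM
  have hM1 : -off ≤ M := hm.1
  obtain ⟨_, hM2, hM3, hmm⟩ := hm
  set r := min M (c + R - p) with hr
  have hrM : r ≤ M := min_le_left _ _
  have hrR : r ≤ c + R - p := min_le_right _ _
  have hrlo : -off ≤ r := by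
    rcases hoff with h | h <;> simp [hr] <;> omega
  refine ⟨hrlo, by omega, by omega, fun k hk1 hk2 => ?_⟩
  have hrefl := fun (j : Int) hj1 hj2 =>
    pvGood_reflect (a := a) ⟨hR1, hR2, hR3, hmc⟩ hoff (j := j) hj1 hj2
  have e1 : PySem.List.pyGet? a (2*c - off - (2*c - p + k)) = PySem.List.pyGet? a (2*c - p + k) :=
    hrefl _ (by omega) (by omega)
  have e2 : PySem.List.pyGet? a (2*c - p - off - k) = PySem.List.pyGet? a (2*c - p + k) :=
    hmm k hk1 (by omega)
  have e3 : PySem.List.pyGet? a (2*c - off - (2*c - p - off - k)) = PySem.List.pyGet? a (2*c - p - off - k) :=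
    hrefl _ (by omega) (by omega)
  rw [show 2*c - off - (2*c - p + k) = p - off - k from by ring] at e1
  rw [show 2*c - off - (2*c - p - off - k) = p + k from by ring] at e3
  rw [e1, ← e2, ← e3]

def pvInv (a : List Char) (off : Int) (p : Nat) (st : Int × Int × List Int × List Bool) : Prop :=
  st.2.2.1.length = a.length ∧
  st.2.2.2.length = a.length + 1 ∧
  (∀ q : Nat, q < p → st.2.2.1[q]? = some (pvMaxrad a off q)) ∧
  (∀ i : Nat, i ≤ a.length → ∃ b, st.2.2.2[i]? = some b ∧
      (b = true ↔ (i = a.length ∨ ∃ q : Nat, q < p ∧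
        pvMaxrad a off (q : Int) = (a.length : Int) - 1 - q ∧
        (i : Int) = 2*(q : Int) - off - ((a.length : Int) - 1)))) ∧
  ((st.1 = 0 ∧ st.2.1 = -1) ∨
   (∃ c : Nat, c < p ∧ st.1 = (c : Int) - off - pvMaxrad a off c ∧
      st.2.1 = (c : Int) + pvMaxrad a off c))

lemma pvStep_inv {a : List Char} {off : Int} {p : Nat} {st : Int × Int × List Int × List Bool}
    (hoff : off = 0 ∨ off = 1) (hp : p < a.length) (hinv : pvInv a off p st) :
    pvInv a off (p + 1) (pvManacherStep a off st p) := by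
  obtain ⟨left, right, cache, result⟩ := st
  obtain ⟨hlc, hlr, hcache, hres, hwin⟩ := hinv
  simp only at hlc hlr hcache hres hwin
  have hoff' : 0 ≤ off := by rcases hoff with h | h <;> omega
  have hp0 : (0 : Int) ≤ (p : Int) := Int.natCast_nonneg p
  have hpn : (p : Int) < (a.length : Int) := by exact_mod_cast hp
  have hrad : pvExpand a off (p : Int)
      (if (p : Int) > right then 1 - off
       else min ((PySem.List.pyGet? cache (left + right - ((p : Int) - off))).getD 0 + 1)
                (right - (p : Int) + 1)) - 1 = pvMaxrad a off (p : Int) := by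
    split_ifs with hgt
    · exact pvExpand_eq_maxrad hp0 hpn hoff' (by
        rw [show (1 : Int) - off - 1 = -off from by ring]
        exact pvGood_base hp0 hpn hoff')
    · rw [not_lt] at hgt
      rcases hwin with ⟨hl0, hr0⟩ | ⟨c, hcp, hleft, hright⟩
      · exfalso; omega
      · have hc0 : (0 : Int) ≤ (c : Int) := Int.natCast_nonneg c
        have hcn : (c : Int) < (a.length : Int) := by
          have : c < p + 1 := by omega
          omega
        set R := pvMaxrad a off (c : Int) with hR
        have hcgood := (pvMaxrad_spec (a := a) (off := off) (p := (c : Int)) hc0 hcn hoff').1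
        have hcR1 : -off ≤ R := hcgood.1
        have hcR2 : 0 ≤ (c : Int) - off - R := hcgood.2.1
        have hcR3 : (c : Int) + R < (a.length : Int) := hcgood.2.2.1
        have hcpI : (c : Int) < (p : Int) := by exact_mod_cast hcp
        have hm0 : (0 : Int) ≤ 2*(c : Int) - (p : Int) := by omega
        have hmlt : (2*(c : Int) - (p : Int)).toNat < p := by omega
        have hidx : left + right - ((p : Int) - off) = 2*(c : Int) - (p : Int) := by
          rw [hleft, hright]; ring
        rw [hidx, PySem.List.pyGet?_of_nonneg cache hm0, hcache _ hmlt,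
            Option.getD_some, Int.toNat_of_nonneg hm0]
        have hmin : min (pvMaxrad a off (2*(c : Int) - (p : Int)) + 1) (right - (p : Int) + 1)
            = min (pvMaxrad a off (2*(c : Int) - (p : Int))) (right - (p : Int)) + 1 := by omega
        rw [hmin]
        apply pvExpand_eq_maxrad hp0 hpn hoff'
        rw [show min (pvMaxrad a off (2*(c:Int) - (p:Int))) (right - (p:Int)) + 1 - 1
              = min (pvMaxrad a off (2*(c:Int) - (p:Int))) (right - (p:Int)) from by ring, hright]
        exact pvMirror_good hoff hc0 hcn hcpI (by omega)
  unfold pvManacherStep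
  simp only
  rw [hrad]
  set rad := pvMaxrad a off (p : Int) with hraddef
  have hgood := (pvMaxrad_spec (a := a) (off := off) (p := (p : Int)) hp0 hpn hoff').1
  have hg1 : -off ≤ rad := hgood.1
  have hg2 : 0 ≤ (p : Int) - off - rad := hgood.2.1
  have hg3 : (p : Int) + rad < (a.length : Int) := hgood.2.2.1
  -- cache component
  have hcache' : ∀ q : Nat, q < p + 1 → (cache.set p rad)[q]? = some (pvMaxrad a off (q : Int)) := by
    intro q hq
    rcases Nat.lt_succ_iff_lt_or_eq.1 hq with h | h
    · rw [List.getElem?_set_ne (by omega)]; exact hcache q h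
    · subst h; rw [List.getElem?_set_self (by omega)]
  -- result component
  set result' := (if (p : Int) + rad = (a.length : Int) - 1 then
      result.set ((p : Int) - off - rad).toNat true else result) with hresult'
  have hres' : ∀ i : Nat, i ≤ a.length →
      ∃ b, result'[i]? = some b ∧
        (b = true ↔ (i = a.length ∨ ∃ q : Nat, q < p + 1 ∧
          pvMaxrad a off (q : Int) = (a.length : Int) - 1 - q ∧
          (i : Int) = 2*(q : Int) - off - ((a.length : Int) - 1))) := by
    intro i hi
    rw [hresult']
    split_ifs with hend
    · set idxI : Int := (p : Int) - off - rad with hidxI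
      have hidx0 : 0 ≤ idxI := hg2
      have hidxn : idxI.toNat ≤ a.length := by omega
      by_cases hieq : i = idxI.toNat
      · refine ⟨true, ?_, ?_⟩
        · rw [hieq, List.getElem?_set_self (by omega)]
        · simp only [true_iff]
          refine Or.inr ⟨p, by omega, by omega, by omega⟩
      · obtain ⟨b, hb, hbiff⟩ := hres i hi
        refine ⟨b, ?_, ?_⟩
        · rw [List.getElem?_set_ne (by omega)]; exact hb
        · rw [hbiff]
          constructor
          · rintro (h | ⟨q, hq, h1, h2⟩)
            · exact Or.inl h
            · exact Or.inr ⟨q, by omega, h1, h2⟩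
          · rintro (h | ⟨q, hq, h1, h2⟩)
            · exact Or.inl h
            · rcases Nat.lt_succ_iff_lt_or_eq.1 hq with h' | h'
              · exact Or.inr ⟨q, h', h1, h2⟩
              · exfalso; subst h'; omega
    · obtain ⟨b, hb, hbiff⟩ := hres i hi
      refine ⟨b, hb, ?_⟩
      rw [hbiff]
      constructor
      · rintro (h | ⟨q, hq, h1, h2⟩)
        · exact Or.inl h
        · exact Or.inr ⟨q, by omega, h1, h2⟩
      · rintro (h | ⟨q, hq, h1, h2⟩)
        · exact Or.inl h
        · rcases Nat.lt_succ_iff_lt_or_eq.1 hq with h' | h'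
          · exact Or.inr ⟨q, h', h1, h2⟩
          · exfalso; subst h'; omega
  have hlr' : result'.length = a.length + 1 := by
    rw [hresult']; split_ifs
    · simp only [List.length_set]; exact hlr
    · exact hlr
  split_ifs with hnew
  · exact ⟨by show (cache.set p rad).length = a.length; simp [hlc], hlr', hcache', hres',
      Or.inr ⟨p, by omega, rfl, rfl⟩⟩
  · refine ⟨by show (cache.set p rad).length = a.length; simp [hlc], hlr', hcache', hres', ?_⟩
    rcases hwin with ⟨h1, h2⟩ | ⟨c, hc, h1, h2⟩
    · exact Or.inl ⟨h1, h2⟩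
    · exact Or.inr ⟨c, by omega, h1, h2⟩

lemma pvInit_inv (a : List Char) (off : Int) :
    pvInv a off 0 (0, -1, List.replicate a.length 0, List.replicate a.length false ++ [true]) := by
  refine ⟨by simp, by simp, fun q hq => absurd hq (Nat.not_lt_zero q), ?_, Or.inl ⟨rfl, rfl⟩⟩
  intro i hi
  rcases lt_or_eq_of_le hi with h | h
  · refine ⟨false, ?_, ?_⟩
    · rw [List.getElem?_append_left (by rw [List.length_replicate]; exact h), List.getElem?_replicate, if_pos h]
    · refine iff_of_false (by simp) ?_
      rintro (h' | ⟨q, hq, _⟩)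
      · omega
      · exact absurd hq (Nat.not_lt_zero q)
  · refine ⟨true, ?_, ?_⟩
    · rw [h, List.getElem?_append_right (by simp)]
      simp
    · simp [h]

lemma pvManacher_inv {a : List Char} {off : Int} (hoff : off = 0 ∨ off = 1) :
    pvInv a off a.length
      ((List.range a.length).foldl (pvManacherStep a off)
        (0, -1, List.replicate a.length 0, List.replicate a.length false ++ [true])) := by
  suffices h : ∀ p : Nat, p ≤ a.length → pvInv a off p
      ((List.range p).foldl (pvManacherStep a off)
        (0, -1, List.replicate a.length 0, List.replicate a.length false ++ [true])) from
    h a.length le_rfl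
  intro p
  induction p with
  | zero => intro _; exact pvInit_inv a off
  | succ p ih =>
      intro hp
      rw [List.range_succ, List.foldl_append, List.foldl_cons, List.foldl_nil]
      exact pvStep_inv hoff (by omega) (ih (by omega))

lemma pvPal_iff {a : List Char} {i : Nat} (hi : i ≤ a.length) :
    (a.drop i = (a.drop i).reverse) ↔
      (∀ j : Nat, j < a.length - i → a[i + j]? = a[a.length - 1 - j]?) := by
  constructor
  · intro h j hj
    have := congrArg (fun l => l[j]?) h
    simp only at this
    rw [List.getElem?_reverse (by simp [List.length_drop]; omega)] at this
    rw [List.getElem?_drop, List.getElem?_drop] at this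
    rw [this, show i + ((a.drop i).length - 1 - j) = a.length - 1 - j from by
      simp [List.length_drop]; omega]
  · intro h
    apply List.ext_getElem?
    intro j
    rcases lt_or_ge j (a.length - i) with hj | hj
    · rw [List.getElem?_reverse (by simp [List.length_drop]; omega)]
      rw [List.getElem?_drop, List.getElem?_drop]
      rw [h j hj, show i + ((a.drop i).length - 1 - j) = a.length - 1 - j from by
        simp [List.length_drop]; omega]
    · rw [List.getElem?_eq_none (by simp [List.length_drop]; omega),
          List.getElem?_eq_none (by simp [List.length_drop]; omega)]

lemma pvGood_end_pal {a : List Char} {off : Int} (hoff : off = 0 ∨ off = 1) {q : Nat}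
    (hq : q < a.length) (hmr : pvMaxrad a off (q : Int) = (a.length : Int) - 1 - q)
    {i : Nat} (hieq : (i : Int) = 2*(q : Int) - off - ((a.length : Int) - 1)) :
    a.drop i = (a.drop i).reverse := by
  have hoff' : 0 ≤ off := by rcases hoff with h | h <;> omega
  have hgood := (pvMaxrad_spec (a := a) (off := off) (p := (q : Int))
      (Int.natCast_nonneg q) (by exact_mod_cast hq) hoff').1
  rw [hmr] at hgood
  obtain ⟨hg1, hg2, hg3, hgm⟩ := hgood
  have hi : i ≤ a.length := by omega
  rw [pvPal_iff hi]
  intro j hj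
  rw [← PySem.List.pyGet?_natCast a (i + j), ← PySem.List.pyGet?_natCast a (a.length - 1 - j)]
  have harg1 : ((i + j : Nat) : Int) = (i : Int) + j := by push_cast; ring
  have harg2 : ((a.length - 1 - j : Nat) : Int) = (a.length : Int) - 1 - j := by omega
  rw [harg1, harg2]
  set r : Int := (a.length : Int) - 1 - q with hrdef
  rcases le_or_gt ((j : Int)) (r + off - 1) with hc1 | hc1
  · have := hgm (r - j) (by omega) (by omega)
    rw [show (q : Int) - off - (r - j) = (i : Int) + j from by omega,
        show (q : Int) + (r - j) = (a.length : Int) - 1 - j from by omega] at this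
    exact this
  · rcases le_or_gt (r + 1) (j : Int) with hc2 | hc2
    · have := hgm ((j : Int) - r - off) (by omega) (by omega)
      rw [show (q : Int) - off - ((j : Int) - r - off) = (a.length : Int) - 1 - j from by omega,
          show (q : Int) + ((j : Int) - r - off) = (i : Int) + j from by omega] at this
      exact this.symm
    · rw [show (i : Int) + j = (a.length : Int) - 1 - j from by omega]

lemma pvPal_exists {a : List Char} {i : Nat} (hi : i < a.length)
    (hpal : a.drop i = (a.drop i).reverse) :
    ∃ off : Int, (off = 0 ∨ off = 1) ∧ ∃ q : Nat, q < a.length ∧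
      pvMaxrad a off (q : Int) = (a.length : Int) - 1 - q ∧
      (i : Int) = 2*(q : Int) - off - ((a.length : Int) - 1) := by
  have hmatch := (pvPal_iff (le_of_lt hi)).1 hpal
  -- choose parity
  obtain ⟨off, hoff, q, hq1, hq2, hqeq⟩ :
      ∃ off : Int, (off = 0 ∨ off = 1) ∧ ∃ q : Nat, i ≤ q ∧ q < a.length ∧
        2*(q : Int) - off = (i : Int) + (a.length : Int) - 1 := by
    rcases Nat.even_or_odd (i + a.length) with ⟨t, ht⟩ | ⟨t, ht⟩
    · exact ⟨1, Or.inr rfl, t, by omega, by omega, by omega⟩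
    · exact ⟨0, Or.inl rfl, t, by omega, by omega, by omega⟩
  have hoff' : 0 ≤ off := by rcases hoff with h | h <;> omega
  refine ⟨off, hoff, q, hq2, ?_, by omega⟩
  set r : Int := (a.length : Int) - 1 - q with hrdef
  have hgood : pvGood a off (q : Int) r := by
    refine ⟨by omega, by omega, by omega, fun k hk1 hk2 => ?_⟩
    have hjn : ∃ jN : Nat, (jN : Int) = (a.length : Int) - 1 - q - k := ⟨((a.length : Int) - 1 - q - k).toNat, by omega⟩
    obtain ⟨jN, hjN⟩ := hjn
    have := hmatch jN (by omega)
    rw [← PySem.List.pyGet?_natCast a (i + jN), ← PySem.List.pyGet?_natCast a (a.length - 1 - jN)] at this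
    rw [show ((i + jN : Nat) : Int) = (q : Int) - off - k from by push_cast; omega,
        show ((a.length - 1 - jN : Nat) : Int) = (q : Int) + k from by omega] at this
    exact this
  have hnot : ¬ pvGood a off (q : Int) (r + 1) := by
    intro h
    have := h.2.2.1
    omega
  exact pvMaxrad_eq_of_good (Int.natCast_nonneg q) (by exact_mod_cast hq2) hoff' hgood hnot

lemma pvAnyZip_manacher_eq_marks (a : List Char) :
    pvAnyZip (pvManacher a 0) (pvManacher a 1) = pvMarks a := by
  unfold pvAnyZip
  have h0 := pvManacher_inv (a := a) (off := 0) (Or.inl rfl)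
  have h1 := pvManacher_inv (a := a) (off := 1) (Or.inr rfl)
  obtain ⟨-, hl0, -, hres0, -⟩ := h0
  obtain ⟨-, hl1, -, hres1, -⟩ := h1
  apply List.ext_getElem?
  intro i
  rcases le_or_gt i a.length with hi | hi
  · obtain ⟨b0, hb0, hb0iff⟩ := hres0 i hi
    obtain ⟨b1, hb1, hb1iff⟩ := hres1 i hi
    have hmark : (pvMarks a)[i]? = some (decide (a.drop i = (a.drop i).reverse)) := by
      unfold pvMarks
      rw [List.getElem?_map, List.getElem?_range (by omega)]
      rfl
    rw [List.getElem?_zipWith]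
    unfold pvManacher
    rw [hb0, hb1, hmark]
    have hiff : (b0 || b1) = true ↔ a.drop i = (a.drop i).reverse := by
      rw [Bool.or_eq_true, hb0iff, hb1iff]
      constructor
      · rintro ((h | ⟨q, hq, h1', h2'⟩) | (h | ⟨q, hq, h1', h2'⟩))
        · subst h; simp
        · exact pvGood_end_pal (Or.inl rfl) hq h1' h2'
        · subst h; simp
        · exact pvGood_end_pal (Or.inr rfl) hq h1' h2'
      · intro hpal
        rcases lt_or_eq_of_le hi with h | h
        · obtain ⟨off, hoff, q, hq, h1', h2'⟩ := pvPal_exists h hpal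
          rcases hoff with ho | ho
          · subst ho; exact Or.inl (Or.inr ⟨q, hq, h1', h2'⟩)
          · subst ho; exact Or.inr (Or.inr ⟨q, hq, h1', h2'⟩)
        · exact Or.inl (Or.inl h)
    have hbo : (b0 || b1) = decide (a.drop i = (a.drop i).reverse) := by
      by_cases hpal : a.drop i = (a.drop i).reverse
      · rw [hiff.2 hpal]; exact (decide_eq_true hpal).symm
      · simp only [decide_eq_false hpal]
        cases hb : (b0 || b1)
        · rfl
        · exact absurd (hiff.1 hb) hpal
    show some (b0 || b1) = some (decide (List.drop i a = (List.drop i a).reverse))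
    rw [hbo]
  · rw [List.getElem?_eq_none, List.getElem?_eq_none]
    · unfold pvMarks; simp; omega
    · simp only [List.length_zipWith, pvManacher]
      omega

lemma pvFold_eq (strings : List String) :
    ∀ acc : List (List Bool) × List (List Bool),
      strings.foldl
        (fun acc s =>
          (acc.1 ++ [pvAnyZip (pvManacher s.toList 0) (pvManacher s.toList 1)],
           acc.2 ++ [pvAnyZip (pvManacher s.toList.reverse 0) (pvManacher s.toList.reverse 1)]))
        acc
      = (acc.1 ++ strings.map (fun s => pvMarks s.toList),
         acc.2 ++ strings.map (fun s => pvMarks s.toList.reverse)) := by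
  induction strings with
  | nil => intro acc; simp
  | cons s ss ih =>
      intro acc
      rw [List.foldl_cons, ih, pvAnyZip_manacher_eq_marks, pvAnyZip_manacher_eq_marks]
      simp

-- ===== VERDICT (by name: the statement is the Claim_ definition above) =====
theorem palindromes_till_the_end_spec : Claim_equal_palindromes_till_the_end := by
  intro strings _
  show _ = _
  unfold palindromes_till_the_end palindromes_till_the_end_alt
  rw [pvFold_eq]
  simp
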